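-- pv_equiv track=rewrite | github.com/ahmadismail764/Problem-Solving | Python/A/670A-holidays.py | calculate_days_off
-- ===== SOURCE A (Python) =====
-- def calculate_days_off(n, start_day):
--     days_off, current_day = 0, start_day
--     while n:
--         if current_day == 6 or current_day == 7:
--             days_off += 1
--         current_day = (current_day % 7) + 1
--         n -= 1
--     return days_off
-- ===== SOURCE B (Python) =====
-- def calculate_days_off(n, start_day):
--     # O(1): count day 6 and day 7 occurrences arithmetically.
--     if n <= 0:
--         return 0
--     first = 1 if start_day in (6, 7) else 0
--     m = n - 1                 # remaining days cycle through 1..7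
--     a = start_day % 7         # zero-based index of the 2nd day
--     def cnt(r):               # days i in [0, m) with (a + i) % 7 == r
--         return (m - (r - a) % 7 + 6) // 7
--     return first + cnt(5) + cnt(6)
-- ===== Notes on version B (the rewrite author's own statement) =====
-- stated objective: faster
-- what changed: Replaced the day-by-day simulation loop with O(1) arithmetic: the first day is checked directly and the remaining n-1 days, which cycle 1..7, have their occurrences of days 6 and 7 counted by a closed-form floor-division formula.
import Mathlib
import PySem

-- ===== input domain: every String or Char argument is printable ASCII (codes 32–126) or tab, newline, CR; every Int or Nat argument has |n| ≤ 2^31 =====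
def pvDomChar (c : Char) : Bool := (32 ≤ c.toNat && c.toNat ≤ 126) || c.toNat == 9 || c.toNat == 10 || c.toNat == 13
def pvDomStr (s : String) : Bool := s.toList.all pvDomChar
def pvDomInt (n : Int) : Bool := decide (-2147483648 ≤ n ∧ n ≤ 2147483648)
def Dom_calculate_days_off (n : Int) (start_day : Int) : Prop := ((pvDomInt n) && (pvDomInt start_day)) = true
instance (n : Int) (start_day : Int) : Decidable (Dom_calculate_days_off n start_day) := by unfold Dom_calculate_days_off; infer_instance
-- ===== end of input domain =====

-- B replaces A's O(n) day-by-day loop with O(1) closed-form arithmetic; return values agree on Pre_ (n ≥ 0).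

-- ===== PORT A =====
-- A's while loop: n is the Int counter (Pre_ gives n ≥ 0, so n.toNat is the trip count)
def pvLoopA : Nat → Int → Int → Int
  | 0, _, days_off => days_off
  | Nat.succ k, current_day, days_off =>
      pvLoopA k (PySem.Int.mod current_day 7 + 1)
        (days_off + (if current_day = 6 ∨ current_day = 7 then 1 else 0))

def calculate_days_off (n : Int) (start_day : Int) : Int :=
  pvLoopA n.toNat start_day 0

-- ===== PORT B =====
-- cnt r: number of i in [0, m) with (a + i) % 7 = r
def pvCnt (m a r : Int) : Int :=
  PySem.Int.floordiv (m - PySem.Int.mod (r - a) 7 + 6) 7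

def calculate_days_off_alt (n : Int) (start_day : Int) : Int :=
  if n ≤ 0 then 0
  else
    (if start_day = 6 ∨ start_day = 7 then 1 else 0)
      + pvCnt (n - 1) (PySem.Int.mod start_day 7) 5
      + pvCnt (n - 1) (PySem.Int.mod start_day 7) 6

-- ===== PRECONDITION & SPEC =====
-- A's while loop never terminates for n < 0 (n is decremented past 0), so those inputs are excluded.
def Pre_calculate_days_off (n : Int) (start_day : Int) : Prop := 0 ≤ n
instance (n : Int) (start_day : Int) : Decidable (Pre_calculate_days_off n start_day) := by
  unfold Pre_calculate_days_off; infer_instance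
def pvWitness_calculate_days_off : Int × Int := (10, 3)

def Spec_calculate_days_off (n : Int) (start_day : Int) (out : Int) : Prop := out = calculate_days_off_alt n start_day
instance (n : Int) (start_day : Int) (out : Int) : Decidable (Spec_calculate_days_off n start_day out) := by unfold Spec_calculate_days_off; infer_instance

-- ===== CLAIM (what is proved, stated in full; the proofs are below) =====
def Claim_equal_calculate_days_off : Prop := ∀ (n : Int) (start_day : Int), Dom_calculate_days_off n start_day → Pre_calculate_days_off n start_day → Spec_calculate_days_off n start_day (calculate_days_off n start_day)

-- ===== LEMMAS AND PROOFS =====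

-- the accumulator splits off
theorem pvLoopA_acc (k : Nat) : ∀ (c off : Int), pvLoopA k c off = off + pvLoopA k c 0 := by
  induction k with
  | zero => intro c off; simp [pvLoopA]
  | succ k ih =>
      intro c off
      simp only [pvLoopA]
      rw [ih, ih ((PySem.Int.mod c 7 + 1)) (0 + _)]
      ring

-- weekend count over m days whose zero-based day indices start at a (0 ≤ a < 7)
def pvH : Nat → Int → Int
  | 0, _ => 0
  | Nat.succ k, a => (if a = 5 ∨ a = 6 then 1 else 0) + pvH k ((a + 1) % 7)

theorem pvLoopA_eq_pvH (k : Nat) : ∀ (c : Int), 1 ≤ c → c ≤ 7 →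
    pvLoopA k c 0 = pvH k (c - 1) := by
  induction k with
  | zero => intro c _ _; simp [pvLoopA, pvH]
  | succ k ih =>
      intro c h1 h7
      simp only [pvLoopA, pvH]
      rw [pvLoopA_acc]
      have hmod : PySem.Int.mod c 7 = (c - 1 + 1) % 7 := by
        rw [PySem.Int.mod_eq_emod_of_pos (by norm_num : (0:Int) < 7)]
        omega
      have hrng : 1 ≤ PySem.Int.mod c 7 + 1 ∧ PySem.Int.mod c 7 + 1 ≤ 7 := by
        rw [hmod]; omega
      rw [ih _ hrng.1 hrng.2, hmod]
      have h2 : (c - 1 + 1) % 7 + 1 - 1 = (c - 1 + 1) % 7 := by ring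
      rw [h2]
      have hiff : (c = 6 ∨ c = 7) ↔ (c - 1 = 5 ∨ c - 1 = 6) := by omega
      simp only [hiff]
      ring

-- closed form for pvH
theorem pvH_closed (k : Nat) : ∀ (a : Int), 0 ≤ a → a < 7 →
    pvH k a = pvCnt (k : Int) a 5 + pvCnt (k : Int) a 6 := by
  induction k with
  | zero =>
      intro a h0 h7
      simp only [pvH, pvCnt, Nat.cast_zero]
      rw [PySem.Int.mod_eq_emod_of_pos (by norm_num : (0:Int) < 7),
          PySem.Int.mod_eq_emod_of_pos (by norm_num : (0:Int) < 7),
          PySem.Int.floordiv_eq_ediv_of_pos (by norm_num : (0:Int) < 7),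
          PySem.Int.floordiv_eq_ediv_of_pos (by norm_num : (0:Int) < 7)]
      omega
  | succ k ih =>
      intro a h0 h7
      have hrng : 0 ≤ (a + 1) % 7 ∧ (a + 1) % 7 < 7 := by omega
      simp only [pvH]
      rw [ih _ hrng.1 hrng.2]
      simp only [pvCnt, Nat.cast_succ,
        PySem.Int.mod_eq_emod_of_pos (by norm_num : (0:Int) < 7),
        PySem.Int.floordiv_eq_ediv_of_pos (by norm_num : (0:Int) < 7)]
      omega

-- ===== VERDICT (by name: the statement is the Claim_ definition above) =====
theorem calculate_days_off_spec : Claim_equal_calculate_days_off := by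
  intro n s _ hpre
  unfold Spec_calculate_days_off calculate_days_off calculate_days_off_alt
  have hn : 0 ≤ n := hpre
  by_cases hz : n ≤ 0
  · have : n = 0 := le_antisymm hz hn
    subst this
    simp [pvLoopA]
  · push_neg at hz
    obtain ⟨k, hk⟩ : ∃ k : Nat, n.toNat = k + 1 := ⟨n.toNat - 1, by omega⟩
    rw [hk]
    simp only [pvLoopA, if_neg (by omega : ¬ n ≤ 0)]
    rw [pvLoopA_acc]
    have hmod : PySem.Int.mod s 7 = s % 7 := PySem.Int.mod_eq_emod_of_pos (by norm_num : (0:Int) < 7)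
    have h1 : 1 ≤ PySem.Int.mod s 7 + 1 := by rw [hmod]; omega
    have h7 : PySem.Int.mod s 7 + 1 ≤ 7 := by rw [hmod]; omega
    rw [pvLoopA_eq_pvH k _ h1 h7]
    have ha : PySem.Int.mod s 7 + 1 - 1 = s % 7 := by rw [hmod]; ring_nf
    rw [ha]
    rw [pvH_closed k (s % 7) (by omega) (by omega)]
    have hkn : (k : Int) = n - 1 := by omega
    rw [hkn, hmod]
    ring
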